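-- pv_equiv track=rewrite | github.com/akhandsingh17/assignments | codingexercise/DoubleFirstElement.py | DoubleFirstElement
-- ===== SOURCE A (Python) =====
-- def DoubleFirstElement(ary):
--
--     for i in range(1,len(ary)):
--         if ary[i-1]== ary[i]:
--             ary[i-1]=ary[i-1]*2
--             ary[i]=0
--
--     cnt=0
--
--     for i in range(0,len(ary)):
--         if ary[i]!=0:
--             ary[cnt]=ary[i]
--             cnt=cnt+1
--
--     while cnt<len(ary):
--         ary[cnt]=0
--         cnt=cnt+1
--
--     return ary
-- ===== SOURCE B (Python) =====
-- def DoubleFirstElement(ary):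
--     # Run-length encoding: a run of k equal nonzero values v contributes k//2 copies
--     # of 2*v followed by (k % 2) copies of v; zero runs contribute nothing; the
--     # emitted values are written back into ary (in-place, like A) and zero-padded.
--     out = []
--     n = len(ary)
--     i = 0
--     while i < n:
--         v = ary[i]
--         j = i
--         while j < n and ary[j] == v:
--             j += 1
--         if v != 0:
--             k = j - i
--             out.extend([v * 2] * (k // 2))
--             if k % 2:
--                 out.append(v)
--         i = j
--     for idx in range(n):
--         ary[idx] = out[idx] if idx < len(out) else 0
--     return ary
-- ===== Notes on version B (the rewrite author's own statement) =====
-- stated objective: alternative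
-- what changed: Replaces A's adjacent-pair merge pass (zeroing merged slots) plus compaction/zero-fill passes by a run-length scan that emits each run of k equal nonzero values v in closed form as k//2 copies of 2*v plus (k % 2) copies of v, skips zero runs, then writes the emitted values back with zero padding.
import Mathlib
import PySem

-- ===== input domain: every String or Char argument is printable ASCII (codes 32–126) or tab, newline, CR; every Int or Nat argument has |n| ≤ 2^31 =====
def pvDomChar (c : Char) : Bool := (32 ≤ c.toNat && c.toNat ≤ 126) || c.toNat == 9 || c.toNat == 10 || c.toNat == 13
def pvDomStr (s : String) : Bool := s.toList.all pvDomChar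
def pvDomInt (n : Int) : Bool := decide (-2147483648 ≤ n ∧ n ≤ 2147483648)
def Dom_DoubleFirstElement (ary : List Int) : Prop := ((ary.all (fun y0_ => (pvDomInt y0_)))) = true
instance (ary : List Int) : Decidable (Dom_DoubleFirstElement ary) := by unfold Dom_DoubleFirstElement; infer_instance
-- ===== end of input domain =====

-- B replaces A's adjacent-merge + compaction passes by a run-length scan emitting each nonzero
-- run in closed form (objective: alternative; equivalence is about the RETURN value — both
-- Pythons mutate ary in place, A by three passes of index writes, Source B by one write-back loop).

-- ===== PORT A =====
-- all indices produced by range(1,len) / range(0,len) are nonnegative and in range, so Nat indexing with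
-- List.getD / List.set is exact here (no Python negative-index or IndexError behaviour is reachable)
def stepMerge (a : List Int) (i : Nat) : List Int :=
  if a.getD (i-1) 0 = a.getD i 0 then
    (a.set (i-1) (a.getD (i-1) 0 * 2)).set i 0
  else a

def stepC (s : List Int × Nat) (i : Nat) : List Int × Nat :=
  if s.1.getD i 0 ≠ 0 then (s.1.set s.2 (s.1.getD i 0), s.2 + 1) else s

-- the final 'while cnt<len(ary): ary[cnt]=0; cnt+=1' loop, transliterated as recursion on len-cnt
def padZeros (a : List Int) (cnt : Nat) : List Int :=
  if h : cnt < a.length then padZeros (a.set cnt 0) (cnt+1) else a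
termination_by a.length - cnt
decreasing_by simp only [List.length_set]; omega

def DoubleFirstElement (ary : List Int) : List Int :=
  let a1 := (List.range' 1 (ary.length - 1)).foldl stepMerge ary
  let r := (List.range' 0 a1.length).foldl stepC (a1, 0)
  padZeros r.1 r.2

-- ===== PORT B =====
-- the inner 'while j < n and ary[j] == v' scan of Source B: run length past the head, and the rest
def takeRun (v : Int) : List Int → Nat × List Int
  | [] => (0, [])
  | x :: t => if x = v then ((takeRun v t).1 + 1, (takeRun v t).2) else (0, x :: t)

theorem takeRun_snd_len (v : Int) (t : List Int) : (takeRun v t).2.length ≤ t.length := by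
  induction t with
  | nil => simp [takeRun]
  | cons x s ih => by_cases h : x = v <;> simp [takeRun, h] <;> omega

-- the outer while loop of Source B: for each run of k equal values v, emit k/2 copies of v*2
-- and (k % 2) copies of v when v ≠ 0, nothing for a zero run
def emitRuns : List Int → List Int
  | [] => []
  | v :: t =>
    (if v = 0 then ([] : List Int)
     else List.replicate (((takeRun v t).1 + 1) / 2) (v * 2)
          ++ (if ((takeRun v t).1 + 1) % 2 = 1 then [v] else []))
      ++ emitRuns (takeRun v t).2
termination_by l => l.length
decreasing_by simpa using Nat.lt_succ_of_le (takeRun_snd_len _ _)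

-- the final write-back loop: positions < len(out) get out[idx], the rest get 0
def DoubleFirstElement_alt (ary : List Int) : List Int :=
  let out := emitRuns ary
  out ++ List.replicate (ary.length - out.length) 0

-- ===== PRECONDITION & SPEC =====
def Spec_DoubleFirstElement (ary : List Int) (out : List Int) : Prop := out = DoubleFirstElement_alt ary
instance (ary : List Int) (out : List Int) : Decidable (Spec_DoubleFirstElement ary out) := by unfold Spec_DoubleFirstElement; infer_instance

-- ===== CLAIM (what is proved, stated in full; the proofs are below) =====
def Claim_equal_DoubleFirstElement : Prop := ∀ (ary : List Int), Dom_DoubleFirstElement ary → Spec_DoubleFirstElement ary (DoubleFirstElement ary)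

-- ===== LEMMAS AND PROOFS =====

-- the emitted-so-far state of A's first loop: prev = value still owed to the output
def mergeAux (prev : Int) : List Int → List Int
  | [] => [prev]
  | x :: t => if x = prev then prev * 2 :: mergeAux 0 t else prev :: mergeAux x t

theorem getD_append_len (pre : List Int) (y : Int) (s : List Int) :
    (pre ++ y :: s).getD pre.length 0 = y := by
  induction pre with
  | nil => simp [List.getD]
  | cons h t ih => simp [List.getD, ih]

theorem getD_append_len1 (pre : List Int) (y x : Int) (s : List Int) :
    (pre ++ y :: x :: s).getD (pre.length + 1) 0 = x := by
  induction pre with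
  | nil => simp [List.getD]
  | cons h t ih => simp [List.getD, ih]

theorem set_append_len (pre : List Int) (y : Int) (s : List Int) (v : Int) :
    (pre ++ y :: s).set pre.length v = pre ++ v :: s := by
  induction pre with
  | nil => simp
  | cons h t ih => simp [ih]

theorem set_append_len1 (pre : List Int) (y x : Int) (s : List Int) (v : Int) :
    (pre ++ y :: x :: s).set (pre.length + 1) v = pre ++ y :: v :: s := by
  induction pre with
  | nil => simp
  | cons h t ih => simp [ih]

theorem mergeAux_length (t : List Int) : ∀ prev, (mergeAux prev t).length = t.length + 1 := by
  induction t with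
  | nil => intro prev; simp [mergeAux]
  | cons x r ih =>
      intro prev
      by_cases h : x = prev <;> simp [mergeAux, h, ih]

theorem mergeA (t : List Int) : ∀ (pre : List Int) (prev : Int),
    (List.range' (pre.length + 1) t.length).foldl stepMerge (pre ++ prev :: t)
      = pre ++ mergeAux prev t := by
  induction t with
  | nil => intro pre prev; simp [mergeAux]
  | cons x r ih =>
      intro pre prev
      rw [List.length_cons, List.range'_succ, List.foldl_cons]
      have hstep : stepMerge (pre ++ prev :: x :: r) (pre.length + 1)
          = if prev = x then pre ++ prev * 2 :: 0 :: r else pre ++ prev :: x :: r := by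
        unfold stepMerge
        simp only [Nat.add_sub_cancel, getD_append_len, getD_append_len1]
        by_cases h : prev = x
        · rw [if_pos h, if_pos h, set_append_len, set_append_len1]
        · rw [if_neg h, if_neg h]
      rw [hstep]
      by_cases h : prev = x
      · rw [if_pos h]
        subst h
        have h2 : (pre ++ prev * 2 :: 0 :: r) = (pre ++ [prev * 2]) ++ 0 :: r := by simp
        have h3 : pre.length + 1 + 1 = (pre ++ [prev * 2]).length + 1 := by simp
        rw [h2, h3, ih (pre ++ [prev * 2]) 0, mergeAux]
        simp
      · simp only [if_neg h]
        have h2 : (pre ++ prev :: x :: r) = (pre ++ [prev]) ++ x :: r := by simp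
        have h3 : pre.length + 1 + 1 = (pre ++ [prev]).length + 1 := by simp
        rw [h2, h3, ih (pre ++ [prev]) x, mergeAux]
        have hx : ¬ x = prev := fun hh => h hh.symm
        simp [hx]

theorem take_set_succ (a : List Int) (c : Nat) (v : Int) (h : c < a.length) :
    (a.set c v).take (c + 1) = a.take c ++ [v] := by
  induction a generalizing c with
  | nil => simp at h
  | cons x t ih =>
      cases c with
      | zero => simp
      | succ c' =>
          simp only [List.set_cons_succ, List.take_succ_cons, List.cons_append]
          rw [ih c' (by simpa using h)]

theorem drop_set_of_lt (a : List Int) (c m : Nat) (v : Int) (h : c < m) :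
    (a.set c v).drop m = a.drop m := by
  induction a generalizing c m with
  | nil => simp
  | cons x t ih =>
      cases c with
      | zero =>
          cases m with
          | zero => omega
          | succ m' => simp
      | succ c' =>
          cases m with
          | zero => omega
          | succ m' => simpa using ih c' m' (by omega)

theorem compactA (suf : List Int) : ∀ (a : List Int) (cnt i0 : Nat),
    cnt ≤ i0 → a.drop i0 = suf →
    ((List.range' i0 suf.length).foldl stepC (a, cnt)).2
        = cnt + (suf.filter (fun v => v != 0)).length ∧
    ((List.range' i0 suf.length).foldl stepC (a, cnt)).1.length = a.length ∧
    ((List.range' i0 suf.length).foldl stepC (a, cnt)).1.take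
        ((List.range' i0 suf.length).foldl stepC (a, cnt)).2
      = a.take cnt ++ suf.filter (fun v => v != 0) := by
  induction suf with
  | nil => intro a cnt i0 hc hd; simp
  | cons x s ih =>
      intro a cnt i0 hc hd
      have hi0 : i0 < a.length := by
        by_contra hcon
        rw [List.drop_eq_nil_of_le (by omega)] at hd
        exact List.cons_ne_nil x s hd.symm
      have hget : a[i0]? = some x := by
        have h0 : (a.drop i0)[0]? = a[i0]? := by
          simpa using List.getElem?_drop a i0 0
        rw [hd] at h0
        simpa using h0.symm
      have hdrop1 : a.drop (i0 + 1) = s := by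
        have h1 : a.drop (i0 + 1) = (a.drop i0).drop 1 := by
          rw [List.drop_drop]
        rw [h1, hd]; rfl
      rw [List.length_cons, List.range'_succ, List.foldl_cons]
      by_cases hx : x = 0
      · have hstep : stepC (a, cnt) i0 = (a, cnt) := by
          unfold stepC; simp [hget, hx]
        rw [hstep]
        have := ih a cnt (i0 + 1) (by omega) hdrop1
        simpa [hx] using this
      · have hstep : stepC (a, cnt) i0 = (a.set cnt x, cnt + 1) := by
          unfold stepC; simp [hget, hx]
        rw [hstep]
        have hdrop' : (a.set cnt x).drop (i0 + 1) = s := by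
          rw [drop_set_of_lt a cnt (i0 + 1) x (by omega), hdrop1]
        obtain ⟨h1, h2, h3⟩ := ih (a.set cnt x) (cnt + 1) (i0 + 1) (by omega) hdrop'
        refine ⟨?_, ?_, ?_⟩
        · rw [h1]; simp [hx]; omega
        · rw [h2]; simp
        · rw [h3, take_set_succ a cnt x (by omega)]
          simp [hx]

theorem padZeros_eq (a : List Int) (cnt : Nat) :
    padZeros a cnt = a.take cnt ++ List.replicate (a.length - cnt) 0 := by
  induction a, cnt using padZeros.induct with
  | case1 a cnt h ih =>
      rw [padZeros, dif_pos h, ih, take_set_succ a cnt 0 h]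
      have h1 : (a.set cnt 0).length = a.length := by simp
      have h2 : a.length - cnt = (a.length - (cnt + 1)) + 1 := by omega
      rw [h1, h2, List.replicate_succ]
      simp
  | case2 a cnt h =>
      rw [padZeros, dif_neg h]
      rw [List.take_of_length_le (by omega)]
      have h0 : a.length - cnt = 0 := by omega
      simp [h0]

-- ===== B-side: equations of emitRuns and the bridge to mergeAux =====

theorem emitRuns_cons (v : Int) (t : List Int) :
    emitRuns (v :: t)
      = (if v = 0 then ([] : List Int)
         else List.replicate (((takeRun v t).1 + 1) / 2) (v * 2)
              ++ (if ((takeRun v t).1 + 1) % 2 = 1 then [v] else []))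
          ++ emitRuns (takeRun v t).2 := by
  rw [emitRuns]

theorem emitRuns_single (v : Int) : emitRuns [v] = if v = 0 then [] else [v] := by
  rw [emitRuns_cons]
  by_cases hv : v = 0 <;> simp [hv, takeRun, emitRuns]

theorem emitRuns_zero_zero (t : List Int) : emitRuns (0 :: 0 :: t) = emitRuns (0 :: t) := by
  rw [emitRuns_cons, emitRuns_cons]
  simp [takeRun]

theorem emitRuns_cons_ne (v x : Int) (t : List Int) (h : x ≠ v) :
    emitRuns (v :: x :: t) = (if v = 0 then [] else [v]) ++ emitRuns (x :: t) := by
  rw [emitRuns_cons]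
  have ht : takeRun v (x :: t) = (0, x :: t) := by simp [takeRun, h]
  rw [ht]
  by_cases hv : v = 0 <;> simp [hv]

theorem emitRuns_cons_cons (v : Int) (t : List Int) (hv : v ≠ 0) :
    emitRuns (v :: v :: t) = v * 2 :: emitRuns t := by
  rw [emitRuns_cons]
  have ht : takeRun v (v :: t) = ((takeRun v t).1 + 1, (takeRun v t).2) := by simp [takeRun]
  rw [ht]
  cases t with
  | nil =>
      simp [takeRun, emitRuns, hv]
  | cons x t' =>
      by_cases hx : x = v
      · subst hx
        have ht2 : takeRun x (x :: t') = ((takeRun x t').1 + 1, (takeRun x t').2) := by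
          simp [takeRun]
        rw [emitRuns_cons, ht2]
        rw [if_neg hv, if_neg hv]
        have e1 : ((takeRun x t').1 + 1 + 1 + 1) / 2 = ((takeRun x t').1 + 1) / 2 + 1 := by omega
        have e2 : ((takeRun x t').1 + 1 + 1 + 1) % 2 = ((takeRun x t').1 + 1) % 2 := by omega
        rw [e1, e2, List.replicate_succ]
        simp
      · have ht2 : takeRun v (x :: t') = (0, x :: t') := by simp [takeRun, hx]
        rw [ht2, if_neg hv]
        simp

-- the bridge: filtering A's merged sequence gives exactly B's run-length emission
theorem bridge : ∀ (n : Nat) (t : List Int), t.length ≤ n → ∀ v : Int,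
    (mergeAux v t).filter (fun x => x != 0) = emitRuns (v :: t) := by
  intro n
  induction n with
  | zero =>
      intro t ht v
      have : t = [] := List.eq_nil_of_length_eq_zero (by omega)
      subst this
      rw [emitRuns_single]
      by_cases hv : v = 0 <;> simp [mergeAux, hv]
  | succ n ih =>
      intro t ht v
      cases t with
      | nil =>
          rw [emitRuns_single]
          by_cases hv : v = 0 <;> simp [mergeAux, hv]
      | cons x t' =>
          have ht' : t'.length ≤ n := by simpa using ht
          by_cases hx : x = v
          · subst hx
            by_cases hv : x = 0
            · subst hv
              rw [emitRuns_zero_zero, ← ih t' ht' 0]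
              simp [mergeAux]
            · rw [emitRuns_cons_cons x t' hv]
              have h2v : ¬ (x * 2 = 0) := by
                intro hc; exact hv (by omega)
              have hQ : (mergeAux 0 t').filter (fun y => y != 0) = emitRuns t' := by
                cases t' with
                | nil => simp [mergeAux, emitRuns]
                | cons y t'' =>
                    have ht'' : t''.length ≤ n := by
                      simp at ht'; omega
                    by_cases hy : y = 0
                    · subst hy
                      rw [← ih t'' ht'' 0]
                      simp [mergeAux]
                    · rw [← ih t'' ht'' y]
                      have : ¬ (y = (0:Int)) := hy
                      simp [mergeAux, this]
              rw [← hQ]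
              simp [mergeAux, h2v]
          · rw [emitRuns_cons_ne v x t' hx, ← ih t' ht' x]
            by_cases hv : v = 0
            · subst hv
              simp [mergeAux, hx]
            · simp [mergeAux, hx, hv]

-- ===== VERDICT (by name: the statement is the Claim_ definition above) =====
theorem DoubleFirstElement_spec : Claim_equal_DoubleFirstElement := by
  intro ary _
  unfold Spec_DoubleFirstElement DoubleFirstElement DoubleFirstElement_alt
  cases ary with
  | nil => simp [padZeros, emitRuns]
  | cons h t =>
      simp only [List.length_cons, Nat.add_sub_cancel]
      have hA1 : (List.range' 1 t.length).foldl stepMerge (h :: t) = mergeAux h t := by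
        simpa using mergeA t [] h
      rw [hA1]
      have hlen : (mergeAux h t).length = t.length + 1 := mergeAux_length t h
      obtain ⟨h1, h2, h3⟩ := compactA (mergeAux h t) (mergeAux h t) 0 0 (le_refl 0) (by simp)
      rw [padZeros_eq, h3, h1, h2]
      rw [bridge t.length t (le_refl _) h]
      simp [hlen]
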